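-- pv_equiv track=rewrite | github.com/w0en/covid19 | pdf_to_gsheets.py | concatenate_address
-- ===== SOURCE A (Python) =====
-- def concatenate_address(address_list):
--     concatenated_list = []
--     for i in address_list:
--         if i[0].isdigit():
--             if address_list.index(i) == 0:
--                 concatenated_list.append(i + ' ')
--             else:
--                 concatenated_list[-1] += i + ' '
--         elif i[0].islower():
--             if address_list.index(i) == 0:
--                 concatenated_list.append(i + ' ')
--             else:
--                 concatenated_list[-1] += i + ' '
--         else:
--             concatenated_list.append(i + ' ')
--     return "".join(concatenated_list)
-- ===== SOURCE B (Python) =====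
-- def concatenate_address(address_list):
--     # right-to-left pass: grow the current group in an accumulator and flush it
--     # whenever a token opens a group (first character neither digit nor lowercase)
--     groups = []
--     current = ''
--     for token in reversed(address_list):
--         current = token + ' ' + current
--         if not (token[0].isdigit() or token[0].islower()):
--             groups.append(current)
--             current = ''
--     if current:
--         groups.append(current)
--     groups.reverse()
--     return ''.join(groups)
-- ===== Notes on version B (the rewrite author's own statement) =====
-- stated objective: faster
-- what changed: B drops A's quadratic list.index lookups and the three append-vs-merge-into-last branches: it builds the groups in a single right-to-left pass with a string accumulator flushed at each group opener, then reverses and joins; Pre_ excludes lists containing an empty-string token, on which both implementations raise IndexError at the first-character test.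
import Mathlib
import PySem

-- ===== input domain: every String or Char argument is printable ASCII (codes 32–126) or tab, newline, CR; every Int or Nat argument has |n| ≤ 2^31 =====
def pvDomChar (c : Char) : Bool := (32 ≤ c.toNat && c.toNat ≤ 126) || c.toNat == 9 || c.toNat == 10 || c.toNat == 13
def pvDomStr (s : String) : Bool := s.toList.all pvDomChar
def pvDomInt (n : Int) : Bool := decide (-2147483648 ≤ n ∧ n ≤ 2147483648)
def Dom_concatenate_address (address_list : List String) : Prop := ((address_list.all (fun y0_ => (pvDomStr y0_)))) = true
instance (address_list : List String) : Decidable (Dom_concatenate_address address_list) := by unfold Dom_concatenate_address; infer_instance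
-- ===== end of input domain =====

-- B replaces A's forward pass with its per-token list.index lookups and append-vs-merge-into-last
-- branches by one right-to-left pass with a flushed string accumulator (alternative algorithm).

-- ===== PORT A =====
-- one loop step of A; i[0] via Str.pyGet? (none = IndexError, excluded by Pre_; the
-- .getD fallback is unreachable inside Pre_).
def concatAStep (address_list : List String) (acc : List String) (i : String) : List String :=
  let c0 := (PySem.Str.pyGet? i 0).getD ' '
  if PySem.Chars.isdigit c0 then
    if PySem.List.index? address_list i = some 0 then acc ++ [i ++ " "]
    else acc.dropLast ++ [acc.getLast?.getD "" ++ i ++ " "]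
  else if PySem.Chars.islower c0 then
    if PySem.List.index? address_list i = some 0 then acc ++ [i ++ " "]
    else acc.dropLast ++ [acc.getLast?.getD "" ++ i ++ " "]
  else acc ++ [i ++ " "]

def concatenate_address (address_list : List String) : String :=
  let concatenated_list := address_list.foldl (concatAStep address_list) []
  PySem.Str.join "" concatenated_list

-- ===== PORT B =====
-- one step of B's reversed loop over (groups, current); token[0] via Str.pyGet? as in port A
def concatBStep (s : List String × String) (token : String) : List String × String :=
  let current := token ++ " " ++ s.2
  let c0 := (PySem.Str.pyGet? token 0).getD ' '
  if !(PySem.Chars.isdigit c0 || PySem.Chars.islower c0) then (s.1 ++ [current], "")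
  else (s.1, current)

def concatenate_address_alt (address_list : List String) : String :=
  let s := address_list.reverse.foldl concatBStep ([], "")
  let groups := if s.2 ≠ "" then s.1 ++ [s.2] else s.1
  PySem.Str.join "" groups.reverse

-- ===== PRECONDITION & SPEC =====
-- Both Pythons raise IndexError at the first-character access of an empty-string token;
-- Pre_ excludes lists containing "".
def Pre_concatenate_address (address_list : List String) : Prop := "" ∉ address_list
instance (address_list : List String) : Decidable (Pre_concatenate_address address_list) := by unfold Pre_concatenate_address; infer_instance
def pvWitness_concatenate_address : List String := ["221b", "Baker", "Street", "London"]

def Spec_concatenate_address (address_list : List String) (out : String) : Prop := out = concatenate_address_alt address_list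
instance (address_list : List String) (out : String) : Decidable (Spec_concatenate_address address_list out) := by unfold Spec_concatenate_address; infer_instance

-- ===== CLAIM (what is proved, stated in full; the proofs are below) =====
def Claim_equal_concatenate_address : Prop := ∀ (address_list : List String), Dom_concatenate_address address_list → Pre_concatenate_address address_list → Spec_concatenate_address address_list (concatenate_address address_list)

-- ===== LEMMAS AND PROOFS =====

theorem chars_join_nil (l : List (List Char)) : PySem.Chars.join [] l = l.flatten := by
  induction l with
  | nil => simp [PySem.Chars.join_nil]
  | cons x xs ih =>
      cases xs with
      | nil => simp [PySem.Chars.join_singleton]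
      | cons y ys => rw [PySem.Chars.join_cons_cons]; simp_all

-- one step of A adds exactly i ++ ' ' to the joined string, whichever branch fires
theorem join_concatAStep (address_list : List String) (acc : List String) (i : String) :
    (PySem.Str.join "" (concatAStep address_list acc i)).toList =
      (PySem.Str.join "" acc).toList ++ i.toList ++ [' '] := by
  unfold concatAStep
  have hmerge : (PySem.Str.join "" (acc.dropLast ++ [acc.getLast?.getD "" ++ i ++ " "])).toList =
      (PySem.Str.join "" acc).toList ++ i.toList ++ [' '] := by
    cases hacc : acc.getLast? with
    | none =>
        have : acc = [] := List.getLast?_eq_none_iff.mp hacc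
        subst this
        simp
    | some l =>
        obtain ⟨ys, rfl⟩ := List.getLast?_eq_some_iff.mp hacc
        simp [chars_join_nil]
  split_ifs <;> try simp_all [chars_join_nil]
  all_goals split_ifs <;> simp_all

-- A's joined result is each token followed by a space, in order
theorem foldl_join (address_list l : List String) (acc : List String) :
    (PySem.Str.join "" (l.foldl (concatAStep address_list) acc)).toList =
      (PySem.Str.join "" acc).toList ++ (l.map (fun t => t.toList ++ [' '])).flatten := by
  induction l generalizing acc with
  | nil => simp
  | cons x xs ih =>
      rw [List.foldl_cons, ih, join_concatAStep]
      simp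

-- B's loop invariant: current ++ join (groups in left-to-right order) accumulates the
-- processed suffix, each token followed by a space, whichever branch fires
theorem concatBStep_inv (l : List String) (gs : List String) (cur : String) :
    ((l.foldr (fun x acc => concatBStep acc x) (gs, cur)).2.toList ++
      (PySem.Str.join "" (l.foldr (fun x acc => concatBStep acc x) (gs, cur)).1.reverse).toList) =
      (l.map (fun t => t.toList ++ [' '])).flatten ++ cur.toList ++ (PySem.Str.join "" gs.reverse).toList := by
  induction l with
  | nil => simp
  | cons x xs ih =>
      rw [List.foldr_cons]
      rcases hp : List.foldr (fun x acc => concatBStep acc x) (gs, cur) xs with ⟨gs1, cur1⟩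
      rw [hp] at ih
      simp only [concatBStep]
      split_ifs with h
      · simp only [List.reverse_append, List.reverse_cons, List.reverse_nil, List.nil_append,
          List.singleton_append]
        rw [show ∀ (a : String) (r : List String),
            (PySem.Str.join "" (a :: r)).toList = a.toList ++ (PySem.Str.join "" r).toList from
          fun a r => by simp [chars_join_nil]]
        simp only [List.map_cons, List.flatten_cons]
        simp at ih
        simp [ih]
      · simp only [List.map_cons, List.flatten_cons]
        simp at ih
        simp [ih]

-- ===== VERDICT (by name: the statement is the Claim_ definition above) =====
theorem concatenate_address_spec : Claim_equal_concatenate_address := by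
  intro address_list _ _
  unfold Spec_concatenate_address concatenate_address concatenate_address_alt
  apply String.toList_inj.mp
  rw [foldl_join]
  rw [List.foldl_reverse]
  have hinv := concatBStep_inv address_list [] ""
  set r := address_list.foldr (fun x acc => concatBStep acc x) (([] : List String), "") with hr
  by_cases h2 : r.2 = ""
  · simp only [h2, ne_eq, not_true_eq_false, if_false]
    simp [h2] at hinv
    simpa using hinv.symm
  · simp only [ne_eq, h2, not_false_eq_true, if_true]
    rw [show (r.1 ++ [r.2]).reverse = r.2 :: r.1.reverse by simp]
    rw [show (PySem.Str.join "" (r.2 :: r.1.reverse)).toList =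
        r.2.toList ++ (PySem.Str.join "" r.1.reverse).toList from by simp [chars_join_nil]]
    simp at hinv
    simpa using hinv.symm
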